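-- pv_equiv track=rewrite | github.com/hwakabh/codewars | HexWordsSum/hex_words_sum.py | hex_word_sum
-- ===== SOURCE A (Python) =====
-- def hex_word_sum(string):
--     keys = {'a': 10, 'b': 11, 'c': 12, 'd': 13, 'e': 14, 'f': 15, 's': 5, 'o': 0}
--     words = string.split()
--     sums = 0
--     for w in words:
--       subtotal = 0
--       for i, c in enumerate(w[::-1].lower()):
--           if c in keys:
--               subtotal += keys[c] * (16 ** i)
--           else:
--               subtotal = 0
--               break
--       sums += subtotal
--     return sums
-- ===== SOURCE B (Python) =====
-- def hex_word_sum(string):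
--     keys = {'a': 10, 'b': 11, 'c': 12, 'd': 13, 'e': 14, 'f': 15, 's': 5, 'o': 0}
--
--     def value(word):
--         w = word.lower()
--         if all(c in keys for c in w):
--             v = 0
--             for c in w:
--                 v = v * 16 + keys[c]
--             return v
--         return 0
--
--     return sum(map(value, string.split()))
-- ===== Notes on version B (the rewrite author's own statement) =====
-- stated objective: faster
-- what changed: Per word, a separate validity pass (all chars in the map) followed by a left-to-right Horner fold replaces A's reverse-the-word, enumerate, per-position 16**i accumulation with break; the total is a sum over a map instead of a running accumulator loop.
import Mathlib
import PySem

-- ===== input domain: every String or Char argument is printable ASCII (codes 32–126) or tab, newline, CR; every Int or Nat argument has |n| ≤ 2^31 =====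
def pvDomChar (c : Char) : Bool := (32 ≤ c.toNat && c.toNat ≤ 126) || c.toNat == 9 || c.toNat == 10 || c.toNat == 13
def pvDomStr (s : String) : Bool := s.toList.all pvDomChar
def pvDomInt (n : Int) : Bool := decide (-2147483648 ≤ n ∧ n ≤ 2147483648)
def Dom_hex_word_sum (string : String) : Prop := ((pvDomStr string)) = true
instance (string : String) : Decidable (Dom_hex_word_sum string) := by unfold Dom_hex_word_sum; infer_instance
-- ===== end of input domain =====

-- ===== PORT A =====
-- B: per word, a validity pass then a left-to-right Horner fold, total as sum-of-map,
-- replacing A's reverse/enumerate/16**i loop with break; return values proved equal.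
def pvKeys : PySem.Dict Char Int :=
  PySem.Dict.ofList [('a', 10), ('b', 11), ('c', 12), ('d', 13), ('e', 14), ('f', 15), ('s', 5), ('o', 0)]

-- inner loop of A: for i, c in enumerate(w[::-1].lower()) with break-to-0
def pvInnerA : List (Int × Char) → Int → Int
  | [], st => st
  | (i, c) :: rest, st =>
    match pvKeys.get? c with
    | some v => pvInnerA rest (st + v * 16 ^ i.toNat)
    | none => 0

def hex_word_sum (string : String) : Int :=
  (PySem.Str.split₀ string).foldl
    (fun sums w =>
      sums +
        pvInnerA
          (PySem.List.enumerate
            (PySem.Str.lower ((PySem.Str.slice? w none none (-1)).getD "")).toList 0) 0)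
    0

-- ===== PORT B =====
-- B's helper `value`: check all chars are digits, then Horner fold; else 0
def pvWordValue (word : String) : Int :=
  let w := (PySem.Str.lower word).toList
  if w.all (fun c => (pvKeys.get? c).isSome) then
    w.foldl (fun v c => v * 16 + (pvKeys.get? c).getD 0) 0
  else 0

def hex_word_sum_alt (string : String) : Int :=
  ((PySem.Str.split₀ string).map pvWordValue).sum

-- ===== PRECONDITION & SPEC =====
def Spec_hex_word_sum (string : String) (out : Int) : Prop := out = hex_word_sum_alt string
instance (string : String) (out : Int) : Decidable (Spec_hex_word_sum string out) := by unfold Spec_hex_word_sum; infer_instance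

-- ===== CLAIM (what is proved, stated in full; the proofs are below) =====
def Claim_equal_hex_word_sum : Prop := ∀ (string : String), Dom_hex_word_sum string → Spec_hex_word_sum string (hex_word_sum string)

-- ===== LEMMAS AND PROOFS =====
-- little-endian value of a digit list (head is least significant)
def pvVal : List Char → Int
  | [] => 0
  | c :: rest => (pvKeys.get? c).getD 0 + 16 * pvVal rest

theorem pvVal_append (xs : List Char) (c : Char) :
    pvVal (xs ++ [c]) = pvVal xs + (pvKeys.get? c).getD 0 * 16 ^ xs.length := by
  induction xs with
  | nil => simp [pvVal]
  | cons x xs ih => simp [pvVal, ih]; ring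

theorem pvInnerA_valid (l : List Char) (i : Nat) (st : Int)
    (h : ∀ c ∈ l, (pvKeys.get? c).isSome = true) :
    pvInnerA (PySem.List.enumerate l (i : Int)) st = st + 16 ^ i * pvVal l := by
  induction l generalizing i st with
  | nil => simp [PySem.List.enumerate_nil, pvInnerA, pvVal]
  | cons c rest ih =>
    have hc : (pvKeys.get? c).isSome = true := h c (List.mem_cons_self ..)
    obtain ⟨v, hv⟩ := Option.isSome_iff_exists.mp hc
    have hcast : ((i : Int) + 1) = ((i + 1 : Nat) : Int) := by push_cast; ring
    rw [PySem.List.enumerate_cons, hcast]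
    simp only [pvInnerA, hv]
    rw [ih _ _ (fun c hc => h c (List.mem_cons_of_mem _ hc))]
    simp only [pvVal, hv, Option.getD_some, Int.toNat_natCast]
    push_cast [pow_succ]
    ring

theorem pvInnerA_invalid (l : List Char) (i : Int) (st : Int)
    (h : ∃ c ∈ l, pvKeys.get? c = none) :
    pvInnerA (PySem.List.enumerate l i) st = 0 := by
  induction l generalizing i st with
  | nil => simp at h
  | cons c rest ih =>
    rw [PySem.List.enumerate_cons]
    rcases h with ⟨d, hd, hnone⟩
    rcases List.mem_cons.mp hd with rfl | hmem
    · simp [pvInnerA, hnone]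
    · cases hv : pvKeys.get? c with
      | none => simp [pvInnerA, hv]
      | some v => simp only [pvInnerA, hv]; exact ih _ _ ⟨d, hmem, hnone⟩

theorem pvHorner (l : List Char) (st : Int) :
    l.foldl (fun v c => v * 16 + (pvKeys.get? c).getD 0) st
      = st * 16 ^ l.length + pvVal l.reverse := by
  induction l generalizing st with
  | nil => simp [pvVal]
  | cons c rest ih =>
    rw [List.foldl_cons, ih, List.reverse_cons, pvVal_append]
    simp [pow_succ]
    ring

theorem pvWord_eq (w : String) :
    pvInnerA
      (PySem.List.enumerate
        (PySem.Str.lower ((PySem.Str.slice? w none none (-1)).getD "")).toList 0) 0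
      = pvWordValue w := by
  rw [PySem.Str.slice?_none_none_neg_one]
  have hl : (PySem.Str.lower (String.ofList w.toList.reverse)).toList
      = ((PySem.Str.lower w).toList).reverse := by
    simp only [PySem.Str.toList_lower, PySem.Chars.lower, String.toList_ofList, List.map_reverse]
  rw [Option.getD_some, hl]
  set l := (PySem.Str.lower w).toList with hldef
  unfold pvWordValue
  rw [← hldef]
  by_cases h : ∀ c ∈ l, (pvKeys.get? c).isSome = true
  · have h' : ∀ c ∈ l.reverse, (pvKeys.get? c).isSome = true := by
      intro c hc; exact h c (List.mem_reverse.mp hc)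
    have hA := pvInnerA_valid l.reverse 0 0 h'
    rw [show ((0 : Nat) : Int) = 0 from rfl] at hA
    rw [hA, if_pos (List.all_eq_true.mpr h), pvHorner]
    simp
  · push Not at h
    obtain ⟨c, hc, hnone⟩ := h
    have hnone' : pvKeys.get? c = none := by
      cases hv : pvKeys.get? c with
      | none => rfl
      | some v => rw [hv] at hnone; simp at hnone
    rw [pvInnerA_invalid _ _ _ ⟨c, List.mem_reverse.mpr hc, hnone'⟩]
    rw [if_neg]
    simp only [List.all_eq_true, not_forall]
    exact ⟨c, hc, by simp [hnone']⟩

theorem pvFold_eq (ws : List String) (acc : Int) :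
    ws.foldl
      (fun sums w =>
        sums +
          pvInnerA
            (PySem.List.enumerate
              (PySem.Str.lower ((PySem.Str.slice? w none none (-1)).getD "")).toList 0) 0)
      acc
    = acc + (ws.map pvWordValue).sum := by
  induction ws generalizing acc with
  | nil => simp
  | cons w ws ih =>
    rw [List.foldl_cons, pvWord_eq, ih, List.map_cons, List.sum_cons]
    ring

-- ===== VERDICT (by name: the statement is the Claim_ definition above) =====
theorem hex_word_sum_spec : Claim_equal_hex_word_sum := by
  intro s _
  unfold Spec_hex_word_sum hex_word_sum hex_word_sum_alt
  rw [pvFold_eq]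
  ring
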